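-- pv_equiv track=rewrite | github.com/raeez/chiral-bar-cobar | compute/lib/minimal_resolution_chiral_engine.py | sl2_hat_hilbert
-- ===== SOURCE A (Python) =====
-- from math import comb
--
-- def sl2_hat_hilbert(n: int) -> int:
--     """dim (V_k(sl_2))_n at generic level k.
--
--     The vacuum module of sl_2-hat at generic level has the same character
--     as the universal enveloping algebra of the loop algebra, computed via
--     the Kac-Weyl character formula.
--
--     For the UNIVERSAL V_k(sl_2) at generic k, the PBW basis is:
--         e_{-m_1} ... e_{-m_a} h_{-n_1} ... h_{-n_b} f_{-p_1} ... f_{-p_c} |0>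
--     with strictly decreasing (or weakly so for the bosonic generators)
--     mode indices summing to n. The character is:
--         chi(q) = prod_{m >= 1} (1 - q^m)^{-3}
--     so dim (V_k(sl_2))_n = number of 3-colored partitions of n.
--     """
--     if n < 0:
--         return 0
--     if n == 0:
--         return 1
--     # 3-colored partitions: coefficient of q^n in prod (1-q^m)^{-3}
--     dp = [0] * (n + 1)
--     dp[0] = 1
--     for m in range(1, n + 1):
--         # Multiply by 1/(1-q^m)^3 = sum_{j>=0} C(j+2, 2) q^{jm}
--         new_dp = [0] * (n + 1)
--         for k in range(n + 1):
--             if dp[k] == 0: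
--                 continue
--             j = 0
--             while k + j * m <= n:
--                 new_dp[k + j * m] += dp[k] * comb(j + 2, 2)
--                 j += 1
--         dp = new_dp
--     return dp[n]
-- ===== SOURCE B (Python) =====
-- def sl2_hat_hilbert(n: int) -> int:
--     if n < 0:
--         return 0
--     if n == 0:
--         return 1
--     # prod_{m>=1} (1-q^m)^{-3}: multiply by 1/(1-q^m) three times in place,
--     # each factor by the O(n) recurrence dp[i] += dp[i-m].
--     dp = [0] * (n + 1)
--     dp[0] = 1
--     for m in range(1, n + 1):
--         for _ in range(3):
--             for i in range(m, n + 1):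
--                 dp[i] += dp[i - m]
--     return dp[n]
-- ===== Notes on version B (the rewrite author's own statement) =====
-- stated objective: faster
-- what changed: Instead of multiplying by the full series (1-q^m)^{-3} with an inner j-loop of binomial-weighted scatters into a fresh array, B multiplies in place by 1/(1-q^m) three times per m via the O(n) prefix recurrence dp[i] += dp[i-m].
import Mathlib
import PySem

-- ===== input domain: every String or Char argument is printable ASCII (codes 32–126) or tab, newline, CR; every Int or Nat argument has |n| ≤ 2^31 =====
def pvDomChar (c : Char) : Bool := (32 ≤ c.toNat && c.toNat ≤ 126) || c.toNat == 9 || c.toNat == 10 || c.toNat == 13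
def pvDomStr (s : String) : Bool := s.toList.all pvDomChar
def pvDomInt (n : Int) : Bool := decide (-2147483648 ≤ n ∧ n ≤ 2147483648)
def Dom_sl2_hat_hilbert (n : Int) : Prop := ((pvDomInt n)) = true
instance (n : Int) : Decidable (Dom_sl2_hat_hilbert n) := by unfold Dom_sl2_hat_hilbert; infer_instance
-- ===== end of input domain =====

-- B multiplies by 1/(1-q^m) three times per m via the in-place recurrence dp[i] += dp[i-m]
-- (O(n^2)) instead of A's binomial-weighted scatter of the full series (1-q^m)^{-3}.

-- ===== PORT A =====

-- new_dp[i] += v  (index always in range in A)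
def pvAddAt (l : List Int) (i : Nat) (v : Int) : List Int := l.set i (l.getD i 0 + v)

-- A's inner `while k + j*m <= n` loop; the `0 < m` conjunct is a totality guard only
-- (A only calls it with m ≥ 1).
def pvAWhile (n k m : Nat) (c : Int) (j : Nat) (acc : List Int) : List Int :=
  if h : k + j * m ≤ n ∧ 0 < m then
    pvAWhile n k m c (j + 1) (pvAddAt acc (k + j * m) (c * (Nat.choose (j + 2) 2 : Int)))
  else acc
termination_by n + 1 - (k + j * m)
decreasing_by simp only [Nat.succ_mul, Nat.mul_succ]; omega

-- A's body of `for m in range(1, n+1)`: multiply dp by (1-q^m)^{-3} into a fresh array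
def pvAStep (n m : Nat) (dp : List Int) : List Int :=
  (List.range (n + 1)).foldl
    (fun acc k => if dp.getD k 0 = 0 then acc else pvAWhile n k m (dp.getD k 0) 0 acc)
    (List.replicate (n + 1) 0)

def sl2_hat_hilbert (n : Int) : Int :=
  if n < 0 then 0
  else if n = 0 then 1
  else
    ((List.range' 1 n.toNat).foldl (fun dp m => pvAStep n.toNat m dp)
      ((List.replicate (n.toNat + 1) 0).set 0 1)).getD n.toNat 0

-- ===== PORT B =====

-- B's `for i in range(m, n+1): dp[i] += dp[i-m]` (multiply by 1/(1-q^m) in place)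
def pvBPass (n m : Nat) (dp : List Int) : List Int :=
  (List.range' m (n + 1 - m)).foldl
    (fun dp i => dp.set i (dp.getD i 0 + dp.getD (i - m) 0)) dp

def sl2_hat_hilbert_alt (n : Int) : Int :=
  if n < 0 then 0
  else if n = 0 then 1
  else
    ((List.range' 1 n.toNat).foldl
        (fun dp m => (List.range 3).foldl (fun dp _ => pvBPass n.toNat m dp) dp)
        ((List.replicate (n.toNat + 1) 0).set 0 1)).getD n.toNat 0

-- ===== PRECONDITION & SPEC =====
def Spec_sl2_hat_hilbert (n : Int) (out : Int) : Prop := out = sl2_hat_hilbert_alt n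
instance (n : Int) (out : Int) : Decidable (Spec_sl2_hat_hilbert n out) := by unfold Spec_sl2_hat_hilbert; infer_instance

-- ===== CLAIM (what is proved, stated in full; the proofs are below) =====
def Claim_equal_sl2_hat_hilbert : Prop := ∀ (n : Int), Dom_sl2_hat_hilbert n → Spec_sl2_hat_hilbert n (sl2_hat_hilbert n)

-- ===== LEMMAS AND PROOFS =====

-- weighted strided sum: ∑_j w j * f (t - j*m), j = 0 .. t/m
def pvS (w : Nat → Int) (m : Nat) (f : Nat → Int) (t : Nat) : Int :=
  ∑ j ∈ Finset.range (t / m + 1), w j * f (t - j * m)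

lemma pvS_lt (w : Nat → Int) (m : Nat) (f : Nat → Int) (t : Nat) (ht : t < m) :
    pvS w m f t = w 0 * f t := by
  simp [pvS, Nat.div_eq_of_lt ht]

lemma pvS_split (w : Nat → Int) (m : Nat) (f : Nat → Int) (t : Nat) (hm : 0 < m) (ht : m ≤ t) :
    pvS w m f t = w 0 * f t + pvS (fun j => w (j + 1)) m f (t - m) := by
  have hdiv : t / m = (t - m) / m + 1 := by
    conv_lhs => rw [← Nat.sub_add_cancel ht]
    rw [Nat.add_div_right _ hm]
  unfold pvS
  rw [hdiv, Finset.sum_range_succ' (fun j => w j * f (t - j * m))]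
  have harg : ∀ j : Nat, t - (j + 1) * m = (t - m) - j * m := by
    intro j; rw [Nat.succ_mul]; omega
  rw [add_comm]
  congr 1
  · simp
  · exact Finset.sum_congr rfl (fun j _ => by rw [harg])

lemma pvS_congr (w : Nat → Int) (m : Nat) (f g : Nat → Int) (t : Nat)
    (h : ∀ s, s ≤ t → f s = g s) : pvS w m f t = pvS w m g t := by
  unfold pvS
  exact Finset.sum_congr rfl (fun j _ => by rw [h _ (Nat.sub_le _ _)])

lemma pvS_wcongr (w w' : Nat → Int) (m : Nat) (f : Nat → Int) (t : Nat)
    (h : ∀ j, w j = w' j) : pvS w m f t = pvS w' m f t := by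
  unfold pvS
  exact Finset.sum_congr rfl (fun j _ => by rw [h])

lemma pvS_add (w w' : Nat → Int) (m : Nat) (f : Nat → Int) (t : Nat) :
    pvS (fun j => w j + w' j) m f t = pvS w m f t + pvS w' m f t := by
  unfold pvS
  rw [← Finset.sum_add_distrib]
  exact Finset.sum_congr rfl (fun j _ => by ring)

-- composing one 1/(1-q^m) pass with a weighted sum accumulates the partial sums of the weights
lemma pvS1_comp (m : Nat) (hm : 0 < m) (w : Nat → Int) (f : Nat → Int) :
    ∀ t, pvS (fun _ => 1) m (pvS w m f) t
      = pvS (fun j => ∑ i ∈ Finset.range (j + 1), w i) m f t := by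
  intro t
  induction t using Nat.strong_induction_on with
  | _ t ih =>
    by_cases ht : t < m
    · rw [pvS_lt _ _ _ _ ht, pvS_lt _ _ _ _ ht, pvS_lt _ _ _ _ ht]
      simp
    · push_neg at ht
      have htm : t - m < t := by omega
      rw [pvS_split (fun _ => 1) m _ t hm ht]
      rw [pvS_split (fun j => ∑ i ∈ Finset.range (j + 1), w i) m f t hm ht]
      rw [ih (t - m) htm]
      have hW : ∀ j : Nat, (∑ i ∈ Finset.range (j + 1 + 1), w i)
          = (∑ i ∈ Finset.range (j + 1), w i) + w (j + 1) := by
        intro j; rw [Finset.sum_range_succ]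
      rw [pvS_wcongr _ _ m f (t - m) hW, pvS_add]
      rw [pvS_split w m f t hm ht]
      simp
      ring
  termination_by t => t

-- getD / set helpers
lemma pvGetD_set_self (l : List Int) (i : Nat) (v : Int) (h : i < l.length) :
    (l.set i v).getD i 0 = v := by
  simp [List.getD_eq_getElem?_getD, List.getElem?_set, h]

lemma pvGetD_set_ne (l : List Int) (i j : Nat) (v : Int) (h : i ≠ j) :
    (l.set i v).getD j 0 = l.getD j 0 := by
  simp [List.getD_eq_getElem?_getD, List.getElem?_set, h]

-- ---------- B side ----------

lemma pvBPass_aux (m c : Nat) (hm : 0 < m) :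
    ∀ (dp : List Int), m + c ≤ dp.length →
      ∀ t, ((List.range' m c).foldl
          (fun dp i => dp.set i (dp.getD i 0 + dp.getD (i - m) 0)) dp).getD t 0
        = if t < m + c then pvS (fun _ => 1) m (fun s => dp.getD s 0) t else dp.getD t 0 := by
  induction c with
  | zero =>
    intro dp _ t
    simp only [List.range', List.foldl_nil, Nat.add_zero]
    split
    · next h => rw [pvS_lt _ _ _ _ h]; simp
    · rfl
  | succ c ih =>
    intro dp hlen t
    rw [List.range'_concat, List.foldl_concat]
    have hlen' : m + c ≤ dp.length := by omega
    have hflen : ((List.range' m c).foldl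
        (fun dp i => dp.set i (dp.getD i 0 + dp.getD (i - m) 0)) dp).length = dp.length := by
      clear ih hlen hlen'
      induction c generalizing dp with
      | zero => simp [List.range']
      | succ c ih2 =>
        rw [List.range'_concat, List.foldl_concat, List.length_set, ih2]
    set L := (List.range' m c).foldl
        (fun dp i => dp.set i (dp.getD i 0 + dp.getD (i - m) 0)) dp with hL
    simp only [one_mul]
    by_cases hteq : t = m + c
    · subst hteq
      rw [pvGetD_set_self _ _ _ (by rw [hflen]; omega)]
      have h1 : L.getD (m + c) 0 = dp.getD (m + c) 0 := by
        rw [ih dp hlen' (m + c)]; simp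
      have h2 : L.getD (m + c - m) 0 = pvS (fun _ => 1) m (fun s => dp.getD s 0) (m + c - m) := by
        rw [ih dp hlen' (m + c - m)]
        rw [if_pos (by omega : m + c - m < m + c)]
      rw [h1, h2, if_pos (by omega : m + c < m + (c + 1))]
      rw [pvS_split (fun _ => 1) m (fun s => dp.getD s 0) (m + c) hm (by omega)]
      simp only [one_mul]
    · rw [pvGetD_set_ne _ _ _ _ (fun h => hteq h.symm)]
      rw [ih dp hlen' t]
      by_cases hlt : t < m + c
      · rw [if_pos hlt, if_pos (by omega : t < m + (c + 1))]
      · rw [if_neg hlt, if_neg (by omega : ¬ t < m + (c + 1))]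

lemma pvBPass_getD (n m : Nat) (hm : 0 < m) (dp : List Int) (hlen : dp.length = n + 1)
    (t : Nat) (ht : t ≤ n) :
    (pvBPass n m dp).getD t 0 = pvS (fun _ => 1) m (fun s => dp.getD s 0) t := by
  unfold pvBPass
  by_cases hmn : m ≤ n + 1
  · rw [pvBPass_aux m (n + 1 - m) hm dp (by omega) t]
    rw [if_pos (show t < m + (n + 1 - m) by omega)]
  · have h0 : n + 1 - m = 0 := by omega
    rw [h0]
    simp only [List.range'_zero, List.foldl_nil]
    rw [pvS_lt _ _ _ _ (by omega)]
    rw [one_mul]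

lemma pvBPass_length (n m : Nat) (dp : List Int) : (pvBPass n m dp).length = dp.length := by
  unfold pvBPass
  generalize (List.range' m (n + 1 - m)) = L
  induction L generalizing dp with
  | nil => rfl
  | cons i L ih => simp only [List.foldl_cons]; rw [ih, List.length_set]

-- ---------- A side ----------

lemma pvAWhile_length (n k m : Nat) (c : Int) (j : Nat) (acc : List Int) :
    (pvAWhile n k m c j acc).length = acc.length := by
  induction j, acc using pvAWhile.induct n k m c with
  | case1 j acc h ih =>
    rw [pvAWhile, dif_pos h, ih]
    simp [pvAddAt, List.length_set]
  | case2 j acc h => rw [pvAWhile, dif_neg h]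

lemma pvAWhile_getD (n k m : Nat) (c : Int) (j : Nat) (acc : List Int)
    (hlen : acc.length = n + 1) (t : Nat) :
    (pvAWhile n k m c j acc).getD t 0
      = acc.getD t 0 + (if k ≤ t ∧ t ≤ n ∧ m ∣ (t - k) ∧ j ≤ (t - k) / m ∧ 0 < m
          then c * (Nat.choose ((t - k) / m + 2) 2 : Int) else 0) := by
  induction j, acc using pvAWhile.induct n k m c with
  | case1 j acc h ih =>
    obtain ⟨hkn, hm⟩ := h
    rw [pvAWhile, dif_pos ⟨hkn, hm⟩]
    rw [ih (by simp [pvAddAt, List.length_set, hlen])]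
    by_cases hteq : t = k + j * m
    · subst hteq
      have hd : (k + j * m - k) / m = j := by
        rw [Nat.add_sub_cancel_left, Nat.mul_div_cancel _ hm]
      have hdvd : m ∣ (k + j * m - k) := by
        rw [Nat.add_sub_cancel_left]; exact dvd_mul_left m j
      have hno : ¬ (k ≤ k + j * m ∧ k + j * m ≤ n ∧ m ∣ (k + j * m - k)
          ∧ j + 1 ≤ (k + j * m - k) / m ∧ 0 < m) := by
        rintro ⟨_, _, _, hj1, _⟩; rw [hd] at hj1; omega
      rw [if_neg hno, if_pos ⟨by omega, hkn, hdvd, by rw [hd], hm⟩, hd]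
      unfold pvAddAt
      rw [pvGetD_set_self _ _ _ (by omega)]
      ring
    · unfold pvAddAt
      rw [pvGetD_set_ne _ _ _ _ (fun h => hteq h.symm)]
      congr 1
      by_cases hc : k ≤ t ∧ t ≤ n ∧ m ∣ (t - k)
      · obtain ⟨h1, h2, h3⟩ := hc
        have hne : (t - k) / m ≠ j := by
          intro hdj
          apply hteq
          have h5 := Nat.div_mul_cancel h3
          rw [hdj] at h5
          omega
        by_cases hj : j + 1 ≤ (t - k) / m
        · rw [if_pos ⟨h1, h2, h3, hj, hm⟩, if_pos ⟨h1, h2, h3, by omega, hm⟩]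
        · rw [if_neg (by rintro ⟨_, _, _, h4, _⟩; exact hj h4),
              if_neg (by rintro ⟨_, _, _, h4, _⟩; omega)]
      · rw [if_neg (by rintro ⟨a, b, d, _⟩; exact hc ⟨a, b, d⟩),
            if_neg (by rintro ⟨a, b, d, _⟩; exact hc ⟨a, b, d⟩)]
  | case2 j acc h =>
    rw [pvAWhile, dif_neg h]
    by_cases hm : 0 < m
    · have hkn : ¬ (k + j * m ≤ n) := fun hc => h ⟨hc, hm⟩
      rw [if_neg]
      · ring
      rintro ⟨h1, h2, h3, h4, _⟩
      have : j * m ≤ t - k := by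
        calc j * m ≤ (t - k) / m * m := Nat.mul_le_mul_right m h4
        _ ≤ t - k := Nat.div_mul_le_self _ _
      omega
    · rw [if_neg (by rintro ⟨_, _, _, _, h5⟩; exact hm h5)]; ring

lemma pvAStep_aux (n m : Nat) (dp : List Int) :
    ∀ (K : List Nat) (acc : List Int), acc.length = n + 1 →
      ∀ t, ((K.foldl (fun acc k => if dp.getD k 0 = 0 then acc
              else pvAWhile n k m (dp.getD k 0) 0 acc) acc)).getD t 0
        = acc.getD t 0 + (K.map (fun k =>
            if k ≤ t ∧ t ≤ n ∧ m ∣ (t - k) ∧ 0 < m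
            then dp.getD k 0 * (Nat.choose ((t - k) / m + 2) 2 : Int) else 0)).sum := by
  intro K
  induction K with
  | nil => intro acc _ t; simp
  | cons k K ih =>
    intro acc hlen t
    simp only [List.foldl_cons, List.map_cons, List.sum_cons]
    have hiff : (k ≤ t ∧ t ≤ n ∧ m ∣ (t - k) ∧ 0 ≤ (t - k) / m ∧ 0 < m)
        ↔ (k ≤ t ∧ t ≤ n ∧ m ∣ (t - k) ∧ 0 < m) := by
      constructor
      · rintro ⟨a, b, d, _, e⟩; exact ⟨a, b, d, e⟩
      · rintro ⟨a, b, d, e⟩; exact ⟨a, b, d, Nat.zero_le _, e⟩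
    by_cases hz : dp.getD k 0 = 0
    · rw [if_pos hz, ih acc hlen t]
      have h0 : (if k ≤ t ∧ t ≤ n ∧ m ∣ (t - k) ∧ 0 < m
          then dp.getD k 0 * (Nat.choose ((t - k) / m + 2) 2 : Int) else 0) = 0 := by
        rw [hz]; split <;> ring
      rw [h0]
      ring
    · rw [if_neg hz, ih _ (by rw [pvAWhile_length, hlen]) t]
      rw [pvAWhile_getD n k m _ 0 acc hlen t]
      rw [if_congr hiff rfl rfl]
      ring

lemma pvListSum_range (N : Nat) (g : Nat → Int) :
    ((List.range N).map g).sum = ∑ k ∈ Finset.range N, g k := by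
  induction N with
  | zero => simp
  | succ N ih => rw [List.range_succ, Finset.sum_range_succ, List.map_append, List.sum_append, ih]; simp

-- gather the scatter sum into the strided form
lemma pvGather (n m t : Nat) (hm : 0 < m) (ht : t ≤ n) (f : Nat → Int) :
    (∑ k ∈ Finset.range (n + 1),
        if k ≤ t ∧ t ≤ n ∧ m ∣ (t - k) ∧ 0 < m
        then f k * (Nat.choose ((t - k) / m + 2) 2 : Int) else 0)
      = pvS (fun j => (Nat.choose (j + 2) 2 : Int)) m f t := by
  rw [← Finset.sum_filter]
  have himg : Finset.filter (fun k => k ≤ t ∧ t ≤ n ∧ m ∣ (t - k) ∧ 0 < m) (Finset.range (n + 1))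
      = Finset.image (fun j => t - j * m) (Finset.range (t / m + 1)) := by
    ext k
    simp only [Finset.mem_filter, Finset.mem_range, Finset.mem_image]
    constructor
    · rintro ⟨hkn, hkt, _, hdvd, _⟩
      refine ⟨(t - k) / m, ?_, ?_⟩
      · have : (t - k) / m ≤ t / m := Nat.div_le_div_right (Nat.sub_le _ _)
        omega
      · have := Nat.div_mul_cancel hdvd
        omega
    · rintro ⟨j, hj, rfl⟩
      have hjm : j * m ≤ t := by
        rw [← Nat.le_div_iff_mul_le hm]; omega
      refine ⟨by omega, by omega, ht, ?_, hm⟩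
      have : t - (t - j * m) = j * m := Nat.sub_sub_self hjm
      rw [this]
      exact dvd_mul_left m j
  rw [himg, Finset.sum_image]
  · unfold pvS
    refine Finset.sum_congr rfl (fun j hj => ?_)
    simp only [Finset.mem_range] at hj
    have hjm : j * m ≤ t := by
      rw [← Nat.le_div_iff_mul_le hm]; omega
    have : t - (t - j * m) = j * m := Nat.sub_sub_self hjm
    rw [this, Nat.mul_div_cancel _ hm]
    ring
  · intro a ha b hb hab
    simp only [Finset.coe_sort_coe, Finset.mem_coe, Finset.mem_range] at ha hb
    have ham : a * m ≤ t := by rw [← Nat.le_div_iff_mul_le hm]; omega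
    have hbm : b * m ≤ t := by rw [← Nat.le_div_iff_mul_le hm]; omega
    have hab' : t - a * m = t - b * m := hab
    have h1 : t - (t - a * m) = t - (t - b * m) := by rw [hab']
    rw [Nat.sub_sub_self ham, Nat.sub_sub_self hbm] at h1
    exact Nat.eq_of_mul_eq_mul_right hm h1

lemma pvAStep_getD (n m : Nat) (hm : 0 < m) (dp : List Int) (hlen : dp.length = n + 1)
    (t : Nat) (ht : t ≤ n) :
    (pvAStep n m dp).getD t 0
      = pvS (fun j => (Nat.choose (j + 2) 2 : Int)) m (fun s => dp.getD s 0) t := by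
  unfold pvAStep
  rw [pvAStep_aux n m dp (List.range (n + 1)) _ (by simp) t]
  rw [pvListSum_range, pvGather n m t hm ht]
  have hlt : t < n + 1 := by omega
  simp [List.getD_eq_getElem?_getD, List.getElem?_replicate, hlt]

lemma pvAStep_length (n m : Nat) (dp : List Int) : (pvAStep n m dp).length = n + 1 := by
  unfold pvAStep
  generalize (List.range (n + 1)) = K
  suffices h : ∀ acc : List Int, ((K.foldl (fun acc k => if dp.getD k 0 = 0 then acc
      else pvAWhile n k m (dp.getD k 0) 0 acc) acc)).length = acc.length by
    rw [h]; simp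
  induction K with
  | nil => intro acc; rfl
  | cons k K ih =>
    intro acc
    simp only [List.foldl_cons]
    split
    · exact ih acc
    · rw [ih, pvAWhile_length]

-- weight bookkeeping: partial sums 1 → j+1 → C(j+2,2)
lemma pvW2 (j : Nat) : (∑ i ∈ Finset.range (j + 1), (1 : Int)) = (j : Int) + 1 := by simp

lemma pvW3 (j : Nat) : (∑ i ∈ Finset.range (j + 1), ((i : Int) + 1))
    = (Nat.choose (j + 2) 2 : Int) := by
  induction j with
  | zero => simp
  | succ j ih =>
    rw [Finset.sum_range_succ, ih]
    have : (j + 1 + 2).choose 2 = (j + 2).choose 1 + (j + 2).choose 2 := Nat.choose_succ_succ _ _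
    rw [this, Nat.choose_one_right]
    push_cast
    ring

-- the per-m equality: one A step = three B passes
lemma pvStep_eq (n m : Nat) (hm : 0 < m) (dp : List Int) (hlen : dp.length = n + 1) :
    pvAStep n m dp = pvBPass n m (pvBPass n m (pvBPass n m dp)) := by
  have hl1 : (pvBPass n m dp).length = n + 1 := by rw [pvBPass_length, hlen]
  have hl2 : (pvBPass n m (pvBPass n m dp)).length = n + 1 := by rw [pvBPass_length, hl1]
  have hl3 : (pvBPass n m (pvBPass n m (pvBPass n m dp))).length = n + 1 := by
    rw [pvBPass_length, hl2]
  apply List.ext_getElem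
  · rw [pvAStep_length, hl3]
  intro t h1 h2
  have ht : t ≤ n := by rw [pvAStep_length] at h1; omega
  rw [← List.getD_eq_getElem _ 0, ← List.getD_eq_getElem _ 0]
  rw [pvAStep_getD n m hm dp hlen t ht]
  rw [pvBPass_getD n m hm _ hl2 t ht]
  have e2 : pvS (fun _ => 1) m (fun s => (pvBPass n m (pvBPass n m dp)).getD s 0) t
      = pvS (fun _ => 1) m (pvS (fun _ => 1) m (pvS (fun _ => 1) m (fun s => dp.getD s 0))) t := by
    apply pvS_congr
    intro s hs
    rw [pvBPass_getD n m hm _ hl1 s (by omega)]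
    apply pvS_congr
    intro s' hs'
    rw [pvBPass_getD n m hm _ hlen s' (by omega)]
  rw [e2]
  have e3 : ∀ u, pvS (fun _ => 1) m (pvS (fun _ => 1) m (fun s => dp.getD s 0)) u
      = pvS (fun j => (j : Int) + 1) m (fun s => dp.getD s 0) u := by
    intro u
    rw [pvS1_comp m hm _ _ u]
    exact pvS_wcongr _ _ m _ u pvW2
  rw [pvS_congr _ m _ _ t (fun s _ => e3 s)]
  rw [pvS1_comp m hm _ _ t]
  exact (pvS_wcongr _ _ m _ t pvW3).symm

lemma pvFold_eq (n : Nat) (L : List Nat) (hL : ∀ m ∈ L, 0 < m) :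
    ∀ dp : List Int, dp.length = n + 1 →
      L.foldl (fun dp m => pvAStep n m dp) dp
        = L.foldl (fun dp m => (List.range 3).foldl (fun dp _ => pvBPass n m dp) dp) dp := by
  induction L with
  | nil => intro dp _; rfl
  | cons m L ih =>
    intro dp hlen
    have hm : 0 < m := hL m (List.mem_cons_self)
    simp only [List.foldl_cons]
    have h3 : (List.range 3).foldl (fun dp _ => pvBPass n m dp) dp
        = pvBPass n m (pvBPass n m (pvBPass n m dp)) := by
      norm_num [List.range_succ]
    rw [h3, ← pvStep_eq n m hm dp hlen]
    exact ih (fun m' hm' => hL m' (List.mem_cons_of_mem _ hm')) _ (pvAStep_length n m dp)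

-- ===== VERDICT (by name: the statement is the Claim_ definition above) =====
theorem sl2_hat_hilbert_spec : Claim_equal_sl2_hat_hilbert := by
  intro n _
  unfold Spec_sl2_hat_hilbert sl2_hat_hilbert sl2_hat_hilbert_alt
  by_cases h1 : n < 0
  · simp [h1]
  · by_cases h2 : n = 0
    · simp [h1, h2]
    · simp only [if_neg h1, if_neg h2]
      rw [pvFold_eq n.toNat (List.range' 1 n.toNat)
        (by intro m hm; rw [List.mem_range'] at hm; omega)
        _ (by simp)]
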